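-- pv_equiv track=rewrite | github.com/IkramFirdaous/Petri_for_Mas | src/petri/mas/topologies.py | _compute_default_levels
-- ===== SOURCE A (Python) =====
-- def _compute_default_levels(num_agents: int) -> list[list[str]]:
--     """Compute default hierarchy levels for a given number of agents."""
--     if num_agents <= 2:
--         return [["supervisor"], ["worker"] * (num_agents - 1)]
--
--     # Roughly binary tree
--     levels = []
--     remaining = num_agents
--     level_size = 1
--
--     while remaining > 0:
--         actual_size = min(level_size, remaining)
--         if len(levels) == 0:
--             roles = ["executive"] * actual_size
--         elif remaining - actual_size <= 0:
--             roles = ["worker"] * actual_size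
--         else:
--             roles = ["supervisor"] * actual_size
--         levels.append(roles)
--         remaining -= actual_size
--         level_size *= 2
--
--     return levels
-- ===== SOURCE B (Python) =====
-- def _compute_default_levels(num_agents: int) -> list[list[str]]:
--     if num_agents <= 2:
--         return [["supervisor"], ["worker"] * (num_agents - 1)]
--     # Closed form: a binary tree on n agents has m = n.bit_length() levels
--     # (smallest m with 2**m - 1 >= n). Level 0 is the executive, levels
--     # 1..m-2 are full supervisor levels of size 2**i, and the last level
--     # holds the remaining n - (2**(m-1) - 1) workers.
--     m = num_agents.bit_length()
--     return ([["executive"]]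
--             + [["supervisor"] * (1 << i) for i in range(1, m - 1)]
--             + [["worker"] * (num_agents - ((1 << (m - 1)) - 1))])
-- ===== Notes on version B (the rewrite author's own statement) =====
-- stated objective: alternative
-- what changed: Replaces A's while-loop that mutates remaining/level_size and decides roles from loop state with a closed-form construction: the level count is num_agents.bit_length(), middle levels are ["supervisor"]*(1<<i) built directly from the index, and the last level's size is the arithmetic remainder n-(2**(m-1)-1); no running remainder is maintained.
import Mathlib
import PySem

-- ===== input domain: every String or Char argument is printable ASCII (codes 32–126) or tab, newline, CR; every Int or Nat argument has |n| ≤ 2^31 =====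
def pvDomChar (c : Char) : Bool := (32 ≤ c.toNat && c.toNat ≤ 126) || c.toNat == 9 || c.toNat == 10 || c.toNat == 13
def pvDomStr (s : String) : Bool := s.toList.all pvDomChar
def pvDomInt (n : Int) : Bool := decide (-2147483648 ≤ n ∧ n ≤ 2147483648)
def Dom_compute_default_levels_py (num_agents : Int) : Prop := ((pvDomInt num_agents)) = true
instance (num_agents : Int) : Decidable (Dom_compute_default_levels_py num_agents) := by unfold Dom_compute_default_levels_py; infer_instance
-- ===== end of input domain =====

-- B replaces A's stateful doubling loop by a closed form: level count = bit_length,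
-- middle levels sized 2^i from the index, last level by an arithmetic remainder.

-- ===== PORT A =====
-- A's while-loop; fuel = remaining.toNat at entry suffices since each iteration removes at least min(level_size, remaining) ≥ 1 agent.
def pvALoop (fuel : Nat) (levels : List (List String)) (remaining level_size : Int) : List (List String) :=
  match fuel with
  | 0 => levels
  | fuel + 1 =>
    if remaining > 0 then
      let actual_size := min level_size remaining
      let roles :=
        if levels.length = 0 then List.replicate actual_size.toNat "executive"
        else if remaining - actual_size ≤ 0 then List.replicate actual_size.toNat "worker"
        else List.replicate actual_size.toNat "supervisor"
      pvALoop fuel (levels ++ [roles]) (remaining - actual_size) (level_size * 2)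
    else levels

def compute_default_levels_py (num_agents : Int) : List (List String) :=
  if num_agents ≤ 2 then [["supervisor"], List.replicate (num_agents - 1).toNat "worker"]
  else pvALoop num_agents.toNat [] num_agents 1

-- ===== PORT B =====
-- Source B's closed form; num_agents.bit_length() for num_agents > 2 is Nat.log2 + 1.
def compute_default_levels_py_alt (num_agents : Int) : List (List String) :=
  if num_agents ≤ 2 then [["supervisor"], List.replicate (num_agents - 1).toNat "worker"]
  else
    let m := Nat.log2 num_agents.toNat + 1
    [["executive"]]
      ++ (List.range' 1 (m - 2)).map (fun i => List.replicate (2 ^ i) "supervisor")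
      ++ [List.replicate (num_agents.toNat - (2 ^ (m - 1) - 1)) "worker"]

-- ===== PRECONDITION & SPEC =====
def Spec_compute_default_levels_py (num_agents : Int) (out : List (List String)) : Prop := out = compute_default_levels_py_alt num_agents
instance (num_agents : Int) (out : List (List String)) : Decidable (Spec_compute_default_levels_py num_agents out) := by unfold Spec_compute_default_levels_py; infer_instance

-- ===== CLAIM (what is proved, stated in full; the proofs are below) =====
def Claim_equal_compute_default_levels_py : Prop := ∀ (num_agents : Int), Dom_compute_default_levels_py num_agents → Spec_compute_default_levels_py num_agents (compute_default_levels_py num_agents)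

-- ===== LEMMAS AND PROOFS =====

-- The list of chunk sizes produced by A's loop.
def pvSizes (fuel : Nat) (remaining level_size : Int) : List Int :=
  match fuel with
  | 0 => []
  | fuel + 1 =>
    if remaining > 0 then
      let s := min level_size remaining
      s :: pvSizes fuel (remaining - s) (level_size * 2)
    else []

-- Reference labeling: role determined by "first chunk?" / "last chunk?".
def pvLabelA (first : Bool) (sizes : List Int) : List (List String) :=
  match sizes with
  | [] => []
  | s :: rest =>
      List.replicate s.toNat
        (if first then "executive" else if rest = [] then "worker" else "supervisor")
        :: pvLabelA false rest

lemma pvSizes_nil_of_nonpos (fuel : Nat) (r ls : Int) (h : ¬ r > 0) : pvSizes fuel r ls = [] := by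
  cases fuel <;> simp [pvSizes, h]

lemma pvALoop_eq_labelA (fuel : Nat) : ∀ (levels : List (List String)) (r ls : Int),
    1 ≤ ls → r.toNat ≤ fuel →
    pvALoop fuel levels r ls = levels ++ pvLabelA (levels.length = 0) (pvSizes fuel r ls) := by
  induction fuel with
  | zero =>
    intro levels r ls _ _
    simp [pvALoop, pvSizes, pvLabelA]
  | succ fuel ih =>
    intro levels r ls hls hfuel
    by_cases hr : r > 0
    · have hmin1 : (1:Int) ≤ min ls r := le_min hls hr
      have hrec : (r - min ls r).toNat ≤ fuel := by omega
      have hls2 : (1:Int) ≤ ls * 2 := by omega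
      simp only [pvALoop, pvSizes, hr, if_pos]
      rw [ih _ _ _ hls2 hrec]
      by_cases hlast : r - min ls r ≤ 0
      · rw [pvSizes_nil_of_nonpos fuel _ _ (by omega)]
        by_cases h0 : levels.length = 0 <;> simp [pvLabelA, h0] <;> omega
      · have hne : pvSizes fuel (r - min ls r) (ls * 2) ≠ [] := by
          cases hf : fuel with
          | zero => omega
          | succ f =>
            rw [pvSizes, if_pos (show r - min ls r > 0 by omega)]
            simp
        by_cases h0 : levels.length = 0 <;> simp [pvLabelA, h0, hne] <;> omega
    · simp [pvALoop, hr, pvSizes_nil_of_nonpos _ _ _ hr, pvLabelA]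

-- Non-first chunks starting at level_size 2^j: t full supervisor levels then the worker remainder.
lemma labelA_sizes_closed (t : Nat) : ∀ (fuel j : Nat) (r : Int),
    0 < r → r.toNat ≤ fuel →
    (2:Int) ^ j * (2 ^ t - 1) < r → r ≤ (2:Int) ^ j * (2 ^ (t + 1) - 1) →
    pvLabelA false (pvSizes fuel r ((2:Int) ^ j)) =
      (List.range' j t).map (fun i => List.replicate (2 ^ i) "supervisor")
        ++ [List.replicate (r - ((2:Int) ^ j * (2 ^ t - 1))).toNat "worker"] := by
  induction t with
  | zero =>
    intro fuel j r hr hfuel hlo hhi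
    have hle : r ≤ (2:Int) ^ j := by simpa using hhi
    obtain ⟨fuel, rfl⟩ : ∃ f, fuel = f + 1 := ⟨fuel - 1, by omega⟩
    have hmin : min ((2:Int) ^ j) r = r := min_eq_right hle
    rw [pvSizes, if_pos hr]
    simp only [hmin]
    rw [pvSizes_nil_of_nonpos fuel _ _ (by omega)]
    simp [pvLabelA]
  | succ t ih =>
    intro fuel j r hr hfuel hlo hhi
    have hpj : (0:Int) < 2 ^ j := by positivity
    have hpt : (1:Int) ≤ 2 ^ t := one_le_pow₀ (by norm_num)
    have ht1 : (2:Int) ^ (t + 1) = 2 ^ t * 2 := pow_succ 2 t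
    have ht2 : (2:Int) ^ (t + 1 + 1) = 2 ^ t * 2 * 2 := by rw [pow_succ, pow_succ]
    rw [ht1] at hlo
    rw [ht2] at hhi
    have hgt : (2:Int) ^ j < r := by
      have h1 : (2:Int) ^ j * 1 ≤ 2 ^ j * (2 ^ t * 2 - 1) :=
        mul_le_mul_of_nonneg_left (by linarith) (le_of_lt hpj)
      linarith
    obtain ⟨fuel, rfl⟩ : ∃ f, fuel = f + 1 := ⟨fuel - 1, by omega⟩
    have hmin : min ((2:Int) ^ j) r = (2:Int) ^ j := min_eq_left (le_of_lt hgt)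
    rw [pvSizes, if_pos hr]
    simp only [hmin]
    have hE : (2:Int) ^ j * 2 = (2:Int) ^ (j + 1) := by rw [pow_succ]
    have hr' : 0 < r - (2:Int) ^ j := by omega
    have hfuel' : (r - (2:Int) ^ j).toNat ≤ fuel := by omega
    have hlo' : (2:Int) ^ (j + 1) * (2 ^ t - 1) < r - 2 ^ j := by
      rw [← hE]; nlinarith [hlo]
    have hhi' : r - 2 ^ j ≤ (2:Int) ^ (j + 1) * (2 ^ (t + 1) - 1) := by
      rw [← hE, ht1]; nlinarith [hhi]
    have hne : pvSizes fuel (r - 2 ^ j) ((2:Int) ^ (j + 1)) ≠ [] := by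
      obtain ⟨f, rfl⟩ : ∃ f', fuel = f' + 1 := ⟨fuel - 1, by omega⟩
      rw [pvSizes, if_pos hr']
      simp
    rw [show pvLabelA false ((2:Int) ^ j :: pvSizes fuel (r - 2 ^ j) (2 ^ j * 2))
          = List.replicate ((2:Int) ^ j).toNat "supervisor"
              :: pvLabelA false (pvSizes fuel (r - 2 ^ j) (2 ^ j * 2)) from by
        rw [pvLabelA]; simp [hE ▸ hne]]
    rw [hE, ih fuel (j + 1) (r - 2 ^ j) hr' hfuel' hlo' hhi']
    have hA : ((2:Int) ^ j).toNat = 2 ^ j := by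
      rw [show ((2:Int) ^ j) = ((2 ^ j : Nat) : Int) from by push_cast; ring, Int.toNat_natCast]
    have hB : r - 2 ^ j - (2:Int) ^ (j + 1) * (2 ^ t - 1) = r - 2 ^ j * (2 ^ (t + 1) - 1) := by
      rw [pow_succ, ht1]; ring
    rw [List.range'_succ, hA, hB]
    simp
-- ===== VERDICT (by name: the statement is the Claim_ definition above) =====
theorem compute_default_levels_py_spec : Claim_equal_compute_default_levels_py := by
  intro n _
  unfold Spec_compute_default_levels_py compute_default_levels_py compute_default_levels_py_alt
  by_cases h : n ≤ 2
  · simp [h]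
  · simp only [h, if_false]
    have h3 : (3:Int) ≤ n := by omega
    have hnn : n.toNat = n := Int.toNat_of_nonneg (by omega)
    set m : Nat := Nat.log2 n.toNat + 1 with hm
    have hm2 : 2 ≤ m := by
      have : 1 ≤ Nat.log2 n.toNat := by
        rw [Nat.le_log2 (by omega)]; omega
      omega
    have hlow : 2 ^ (m - 1) ≤ n.toNat := by
      have := Nat.log2_self_le (n := n.toNat) (by omega)
      simpa [hm] using this
    have hhigh : n.toNat < 2 ^ m := by
      have := Nat.lt_log2_self (n := n.toNat)
      simpa [hm] using this
    -- run A's loop: first chunk is the executive, rest labeled by the closed form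
    rw [pvALoop_eq_labelA n.toNat [] n 1 (by omega) (le_refl _)]
    obtain ⟨f, hf⟩ : ∃ f, n.toNat = f + 1 := ⟨n.toNat - 1, by omega⟩
    rw [hf, pvSizes, if_pos (by omega)]
    have hmin : min (1:Int) n = 1 := min_eq_left (by omega)
    simp only [hmin]
    have hne : pvSizes f (n - 1) (1 * 2) ≠ [] := by
      obtain ⟨f', rfl⟩ : ∃ f', f = f' + 1 := ⟨f - 1, by omega⟩
      rw [pvSizes, if_pos (by omega)]
      simp
    rw [show pvLabelA (([] : List (List String)).length = 0) ((1:Int) :: pvSizes f (n - 1) (1 * 2))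
          = List.replicate (1:Int).toNat "executive" :: pvLabelA false (pvSizes f (n - 1) (1 * 2)) from by
        rw [pvLabelA]; simp]
    have h12 : (1:Int) * 2 = (2:Int) ^ 1 := by norm_num
    -- cast the Nat power bounds to Int
    have hlowI : (2:Int) ^ (m - 1) ≤ n := by
      have := hlow; rw [← hnn]; exact_mod_cast this
    have hhighI : n < (2:Int) ^ m := by
      rw [← hnn]; exact_mod_cast hhigh
    have hmm : m - 2 + 1 = m - 1 := by omega
    have hlo : (2:Int) ^ 1 * (2 ^ (m - 2) - 1) < n - 1 := by
      have : (2:Int) ^ 1 * 2 ^ (m - 2) = 2 ^ (m - 1) := by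
        rw [← pow_add]; congr 1; omega
      nlinarith [hlowI, this]
    have hhi : n - 1 ≤ (2:Int) ^ 1 * (2 ^ (m - 2 + 1) - 1) := by
      have : (2:Int) ^ 1 * 2 ^ (m - 2 + 1) = 2 ^ m := by
        rw [← pow_add]; congr 1; omega
      nlinarith [hhighI, this]
    rw [h12, labelA_sizes_closed (m - 2) f 1 (n - 1) (by omega) (by omega) hlo hhi]
    have hW : (n - 1 - (2:Int) ^ 1 * (2 ^ (m - 2) - 1)).toNat = n.toNat - (2 ^ (m - 1) - 1) := by
      have hP : (2:Int) ^ 1 * 2 ^ (m - 2) = ((2 ^ (m - 1) : Nat) : Int) := by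
        push_cast
        rw [← hmm, pow_succ]
        ring
      have hQ : n - 1 - (2:Int) ^ 1 * (2 ^ (m - 2) - 1) = n - ((2 ^ (m - 1) : Nat) : Int) + 1 := by
        rw [← hP]; ring
      have h1 : 1 ≤ 2 ^ (m - 1) := Nat.one_le_two_pow
      rw [hQ]
      omega
    rw [hW, hf]
    simp
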